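-- pv_equiv track=rewrite | github.com/Mark-Mulligan/advent-of-code-2023 | day11/part1.py | add_extra_columns
-- ===== SOURCE A (Python) =====
-- def add_extra_columns(matrix):
--     matrix_base = [[] for _ in matrix]
--
--     for c in range(len(matrix[0])):
--         hash_found = False
--         for r in range(len(matrix)):
--             if matrix[r][c] == '#':
--                 hash_found = True
--             matrix_base[r].append(matrix[r][c])
--
--         if not hash_found:
--             for r in range(len(matrix)):
--                 matrix_base[r].append('.')
--
--     return matrix_base
-- ===== SOURCE B (Python) =====
-- def add_extra_columns(matrix):
--     width = len(matrix[0])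
--     empty_cols = {c for c in range(width)
--                   if all(matrix[r][c] != '#' for r in range(len(matrix)))}
--     result = []
--     for r in range(len(matrix)):
--         row = []
--         for c in range(width):
--             row.append(matrix[r][c])
--             if c in empty_cols:
--                 row.append('.')
--         result.append(row)
--     return result
-- ===== Notes on version B (the rewrite author's own statement) =====
-- stated objective: alternative
-- what changed: B first computes the set of empty columns in one pass, then builds the result row by row appending to each row locally, instead of A's column-major construction that repeatedly appends into every row's accumulator per column.
import Mathlib
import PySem

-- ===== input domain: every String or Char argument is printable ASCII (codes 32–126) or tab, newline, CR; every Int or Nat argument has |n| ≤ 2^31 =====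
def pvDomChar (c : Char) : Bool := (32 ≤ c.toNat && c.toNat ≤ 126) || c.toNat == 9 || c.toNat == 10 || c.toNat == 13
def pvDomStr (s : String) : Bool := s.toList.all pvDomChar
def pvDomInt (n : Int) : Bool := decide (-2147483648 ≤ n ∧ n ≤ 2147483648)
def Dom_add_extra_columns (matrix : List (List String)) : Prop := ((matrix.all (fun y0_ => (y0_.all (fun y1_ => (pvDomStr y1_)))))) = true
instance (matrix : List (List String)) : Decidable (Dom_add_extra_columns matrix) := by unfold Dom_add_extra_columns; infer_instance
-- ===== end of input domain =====

-- B precomputes the set of empty columns once, then builds the result row by row with a local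
-- accumulator, instead of A's column-major pass that appends into every row per column (alternative decomposition, same cost).

-- shared helper: matrix[r][c] (always in range under Pre_, where the default is never used)
def pvAt (matrix : List (List String)) (r c : Int) : String :=
  PySem.List.pyGetD (PySem.List.pyGetD matrix r []) c ""

-- ===== PORT A =====
-- body of A's outer loop: one column c — scan the rows for '#' while appending the column,
-- then append '.' to every row if no '#' was found
def pvStepA (matrix matrix_base : List (List String)) (c : Int) : List (List String) :=
  let st :=
    (PySem.List.pyRange 0 (matrix.length : Int) 1).foldl
      (fun (st : Bool × List (List String)) r =>
        (if pvAt matrix r c == "#" then true else st.1,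
         st.2.set r.toNat (st.2.getD r.toNat [] ++ [pvAt matrix r c])))
      (false, matrix_base)
  if !st.1 then
    (PySem.List.pyRange 0 (matrix.length : Int) 1).foldl
      (fun mb r => mb.set r.toNat (mb.getD r.toNat [] ++ ["."])) st.2
  else st.2

def add_extra_columns (matrix : List (List String)) : List (List String) :=
  let matrix_base : List (List String) := matrix.map (fun _ => ([] : List String))
  (PySem.List.pyRange 0 ((PySem.List.pyGetD matrix 0 []).length : Int) 1).foldl
    (pvStepA matrix) matrix_base

-- ===== PORT B =====
def add_extra_columns_alt (matrix : List (List String)) : List (List String) :=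
  let width : Int := ((PySem.List.pyGetD matrix 0 []).length : Int)
  let empty_cols : PySem.Set Int :=
    PySem.Set.ofList ((PySem.List.pyRange 0 width 1).filter
      (fun c => (PySem.List.pyRange 0 (matrix.length : Int) 1).all
        (fun r => pvAt matrix r c != "#")))
  (PySem.List.pyRange 0 (matrix.length : Int) 1).map (fun r =>
    (PySem.List.pyRange 0 width 1).foldl (fun row c =>
      let row := row ++ [pvAt matrix r c]
      if PySem.Set.contains empty_cols c then row ++ ["."] else row) [])

-- ===== PRECONDITION & SPEC =====
-- Pre_: exactly the inputs where A returns — matrix nonempty (len(matrix[0]) raises IndexError on an empty matrix)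
-- and every row at least as long as row 0 (otherwise matrix[r][c] raises IndexError).
def Pre_add_extra_columns (matrix : List (List String)) : Prop :=
  matrix ≠ [] ∧ ∀ row ∈ matrix, (matrix.headD []).length ≤ row.length
instance (matrix : List (List String)) : Decidable (Pre_add_extra_columns matrix) := by
  unfold Pre_add_extra_columns; infer_instance
def pvWitness_add_extra_columns : List (List String) := [["#", "."], [".", "."]]

def Spec_add_extra_columns (matrix : List (List String)) (out : List (List String)) : Prop := out = add_extra_columns_alt matrix
instance (matrix : List (List String)) (out : List (List String)) : Decidable (Spec_add_extra_columns matrix out) := by unfold Spec_add_extra_columns; infer_instance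

-- ===== CLAIM (what is proved, stated in full; the proofs are below) =====
def Claim_equal_add_extra_columns : Prop := ∀ (matrix : List (List String)), Dom_add_extra_columns matrix → Pre_add_extra_columns matrix → Spec_add_extra_columns matrix (add_extra_columns matrix)

-- ===== LEMMAS AND PROOFS =====

-- "column c has no '#'" and the fragment each column contributes to every row
def pvColEmpty (matrix : List (List String)) (c : Int) : Bool :=
  (PySem.List.pyRange 0 (matrix.length : Int) 1).all (fun r => pvAt matrix r c != "#")

def pvPiece (matrix : List (List String)) (r c : Int) : List String :=
  [pvAt matrix r c] ++ (if pvColEmpty matrix c then ["."] else [])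

lemma pv_foldl_any (p : Int → Bool) : ∀ (l : List Int) (b : Bool),
    l.foldl (fun hf r => if p r then true else hf) b = (b || l.any p) := by
  intro l
  induction l with
  | nil => intro b; simp
  | cons x l ih => intro b; rw [List.foldl_cons, ih]; cases b <;> cases hx : p x <;> simp [hx]

lemma pv_all_not_any (p : Int → Bool) (l : List Int) :
    l.all (fun r => !(p r)) = !(l.any p) := by
  induction l with
  | nil => simp
  | cons x l ih => simp [ih]

lemma pv_colEmpty_eq (matrix : List (List String)) (c : Int) :
    pvColEmpty matrix c
    = !((PySem.List.pyRange 0 (matrix.length : Int) 1).any (fun r => pvAt matrix r c == "#")) :=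
  pv_all_not_any (fun r => pvAt matrix r c == "#") _

lemma pv_foldl_pair (matrix : List (List String)) (c : Int) :
    ∀ (l : List Int) (b : Bool) (mb : List (List String)),
    l.foldl (fun (st : Bool × List (List String)) r =>
        (if pvAt matrix r c == "#" then true else st.1,
         st.2.set r.toNat (st.2.getD r.toNat [] ++ [pvAt matrix r c]))) (b, mb)
    = (l.foldl (fun hf r => if pvAt matrix r c == "#" then true else hf) b,
       l.foldl (fun mb r => mb.set r.toNat (mb.getD r.toNat [] ++ [pvAt matrix r c])) mb) := by
  intro l
  induction l with
  | nil => intro b mb; rfl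
  | cons r l ih => intro b mb; rw [List.foldl_cons, ih]; rfl

lemma pv_foldl_set (f : Int → List String) : ∀ (m : Nat) (mb : List (List String)), m ≤ mb.length →
    (PySem.List.pyRange 0 (m : Int) 1).foldl
      (fun mb r => mb.set r.toNat (mb.getD r.toNat [] ++ f r)) mb
    = mb.mapIdx (fun i row => if i < m then row ++ f (i : Int) else row) := by
  intro m
  induction m with
  | zero =>
      intro mb _
      rw [show ((0 : Nat) : Int) = 0 from rfl, PySem.List.pyRange_one_eq_nil (le_refl 0), List.foldl_nil]
      apply List.ext_getElem
      · simp
      · intro i h1 h2; simp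
  | succ m ih =>
      intro mb hm
      have hr : ((m + 1 : Nat) : Int) = (m : Int) + 1 := by push_cast; ring
      rw [hr, PySem.List.pyRange_one_succ_right (Int.natCast_nonneg m), List.foldl_append,
        ih mb (by omega), List.foldl_cons, List.foldl_nil]
      have hmlt : m < mb.length := by omega
      have hget : (mb.mapIdx (fun i row => if i < m then row ++ f i else row)).getD ((m : Int)).toNat []
          = mb[m] := by
        rw [Int.toNat_natCast, List.getD_eq_getElem _ _ (by simpa using hmlt)]
        simp
      rw [hget]
      apply List.ext_getElem
      · simp
      · intro i h1 h2
        simp only [Int.toNat_natCast, List.getElem_set, List.getElem_mapIdx]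
        by_cases hi : m = i
        · subst hi; simp
        · have hi' : i ≠ m := fun h => hi h.symm
          simp only [hi, if_false]
          by_cases hlt : i < m
          · simp [hlt, Nat.lt_succ_of_lt hlt]
          · have : ¬ i < m + 1 := by omega
            simp [hlt, this]

lemma pv_mapIdx_map_range (n : Nat) (g : Int → List String) (F : Nat → List String → List String) :
    ((PySem.List.pyRange 0 (n : Int) 1).map g).mapIdx (fun i row => F i row)
    = (PySem.List.pyRange 0 (n : Int) 1).map (fun r => F r.toNat (g r)) := by
  apply List.ext_getElem
  · simp
  · intro i h1 h2
    simp [List.getElem_mapIdx, PySem.List.getElem_pyRange_one]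

lemma pv_stepA_eq (matrix : List (List String)) (g : Int → List String) (c : Int) :
    pvStepA matrix ((PySem.List.pyRange 0 (matrix.length : Int) 1).map g) c
    = (PySem.List.pyRange 0 (matrix.length : Int) 1).map (fun r => g r ++ pvPiece matrix r c) := by
  unfold pvStepA
  rw [pv_foldl_pair, pv_foldl_any, Bool.false_or,
    pv_foldl_set (fun r => [pvAt matrix r c]) matrix.length _ (by simp),
    pv_mapIdx_map_range]
  cases ha : (PySem.List.pyRange 0 (matrix.length : Int) 1).any (fun r => pvAt matrix r c == "#") with
  | true =>
      simp only [Bool.not_true, Bool.false_eq_true, if_false]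
      apply List.map_congr_left
      intro r hr
      have hr' := PySem.List.mem_pyRange_one.mp hr
      have h1 : (r.toNat : Int) = r := Int.toNat_of_nonneg hr'.1
      have h2 : r.toNat < matrix.length := by omega
      simp [pvPiece, pv_colEmpty_eq, ha, h1, h2]
  | false =>
      simp only [Bool.not_false, if_true]
      rw [pv_foldl_set (fun _ => ["."]) matrix.length _ (by simp), pv_mapIdx_map_range]
      apply List.map_congr_left
      intro r hr
      have hr' := PySem.List.mem_pyRange_one.mp hr
      have h1 : (r.toNat : Int) = r := Int.toNat_of_nonneg hr'.1
      have h2 : r.toNat < matrix.length := by omega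
      simp [pvPiece, pv_colEmpty_eq, ha, h1, h2]

lemma pv_outerA (matrix : List (List String)) : ∀ (L : List Int) (g : Int → List String),
    L.foldl (pvStepA matrix) ((PySem.List.pyRange 0 (matrix.length : Int) 1).map g)
    = (PySem.List.pyRange 0 (matrix.length : Int) 1).map
        (fun r => g r ++ L.flatMap (fun c => pvPiece matrix r c)) := by
  intro L
  induction L with
  | nil => intro g; simp
  | cons c L ih =>
      intro g
      rw [List.foldl_cons, pv_stepA_eq matrix g c, ih]
      apply List.map_congr_left
      intro r _
      simp [List.append_assoc]

lemma pv_foldl_rowB (p : Int → Bool) (x : Int → String) : ∀ (l : List Int) (init : List String),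
    l.foldl (fun row c =>
        let row := row ++ [x c]
        if p c then row ++ ["."] else row) init
    = init ++ l.flatMap (fun c => [x c] ++ if p c then ["."] else []) := by
  intro l
  induction l with
  | nil => intro init; simp
  | cons c l ih =>
      intro init
      rw [List.foldl_cons, ih]
      by_cases hp : p c <;> simp [hp]

theorem pv_A_canon (matrix : List (List String)) :
    add_extra_columns matrix
    = (PySem.List.pyRange 0 (matrix.length : Int) 1).map
        (fun r => (PySem.List.pyRange 0 ((PySem.List.pyGetD matrix 0 []).length : Int) 1).flatMap
          (fun c => pvPiece matrix r c)) := by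
  unfold add_extra_columns
  have hbase : matrix.map (fun _ => ([] : List String))
      = (PySem.List.pyRange 0 (matrix.length : Int) 1).map (fun _ => ([] : List String)) := by
    apply List.ext_getElem <;> simp
  rw [hbase, pv_outerA matrix _ (fun _ => [])]
  simp

theorem pv_B_canon (matrix : List (List String)) :
    add_extra_columns_alt matrix
    = (PySem.List.pyRange 0 (matrix.length : Int) 1).map
        (fun r => (PySem.List.pyRange 0 ((PySem.List.pyGetD matrix 0 []).length : Int) 1).flatMap
          (fun c => pvPiece matrix r c)) := by
  unfold add_extra_columns_alt
  apply List.map_congr_left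
  intro r _
  rw [pv_foldl_rowB, List.nil_append, List.flatMap_def, List.flatMap_def]
  apply congrArg List.flatten
  apply List.map_congr_left
  intro c hc
  have hcont : PySem.Set.contains
      (PySem.Set.ofList ((PySem.List.pyRange 0 ((PySem.List.pyGetD matrix 0 []).length : Int) 1).filter
        (fun c => (PySem.List.pyRange 0 (matrix.length : Int) 1).all
          (fun r => pvAt matrix r c != "#")))) c
      = pvColEmpty matrix c := by
    cases hp : pvColEmpty matrix c with
    | false =>
        have hnm : c ∉ PySem.Set.ofList ((PySem.List.pyRange 0 ((PySem.List.pyGetD matrix 0 []).length : Int) 1).filter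
            (fun c => (PySem.List.pyRange 0 (matrix.length : Int) 1).all
              (fun r => pvAt matrix r c != "#"))) := by
          simp only [pvColEmpty] at hp
          simp [PySem.Set.mem_ofList, List.mem_filter, hp]
        cases hcc : PySem.Set.contains _ c with
        | false => rfl
        | true => exact absurd ((PySem.Set.contains_iff _ _).mp hcc) hnm
    | true =>
        apply (PySem.Set.contains_iff _ _).mpr
        apply (PySem.Set.mem_ofList _ _).mpr
        apply List.mem_filter.mpr
        refine ⟨hc, ?_⟩
        simpa [pvColEmpty] using hp
  rw [hcont]
  rfl

-- ===== VERDICT (by name: the statement is the Claim_ definition above) =====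
theorem add_extra_columns_spec : Claim_equal_add_extra_columns := by
  intro matrix _ _
  unfold Spec_add_extra_columns
  rw [pv_A_canon, pv_B_canon]
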